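-- pv_equiv track=rewrite | github.com/bsiranosian/brown-compbio | CSCI2951/hw2/em_haplotype.py | getHaplotypes
-- ===== SOURCE A (Python) =====
-- import itertools
--
-- def getHaplotypes(gList):
-- 	# remove duplicates
-- 	gList.sort()
-- 	uList = list(l for l,_ in itertools.groupby(gList))
-- 	# haplotype list to add to
-- 	hList = []
--
-- 	for u in uList:
-- 		# if no ambiguities
-- 		if (2 not in u) and (u not in hList):
-- 			hList.append(u)
-- 		# if ambiguities
-- 		else:
-- 			#temporary list to store
-- 			temp=[]
-- 			for pos in u:
-- 				if pos == 2:
-- 					if len(temp) ==0: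
-- 						temp=[[0],[1]]
-- 					else:
-- 						temp0 = [l+[0] for l in temp]
-- 						temp1 = [l+[1] for l in temp]
-- 						temp = temp0 + temp1
-- 				else:
-- 					if len(temp) ==0:
-- 						temp = [[pos]]
-- 					else:
-- 						temp = [l+[pos] for l in temp]
--
-- 			# add unique elements
-- 			for t in temp:
-- 				if t not in hList: hList.append(t)
--
-- 	return hList
-- ===== SOURCE B (Python) =====
-- def getHaplotypes(gList):
--     # remove duplicates (same in-place sort as A; consecutive-duplicate skip)
--     gList.sort()
--     hList = []
--     seen = set()
--     prev = None
--     for u in gList: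
--         if u == prev:
--             continue
--         prev = u
--         # enumerate all resolutions of the ambiguous (== 2) positions by a bitmask;
--         # bit j of mask resolves the j-th ambiguous position (first one varies fastest)
--         for mask in range(2 ** u.count(2)):
--             h = []
--             m = mask
--             for v in u:
--                 if v == 2:
--                     h.append(m % 2)
--                     m //= 2
--                 else:
--                     h.append(v)
--             t = tuple(h)
--             if t not in seen:
--                 seen.add(t)
--                 hList.append(h)
--     return hList
-- ===== Notes on version B (the rewrite author's own statement) =====
-- stated objective: alternative
-- what changed: B replaces A's list-doubling cartesian expansion and O(|hList|) list-membership dedup by direct bitmask enumeration of the ambiguous positions (bit j resolves the j-th '2'), a single pass over the sorted list with a previous-element skip instead of itertools.groupby, and a set for deduplication.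
import Mathlib
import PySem

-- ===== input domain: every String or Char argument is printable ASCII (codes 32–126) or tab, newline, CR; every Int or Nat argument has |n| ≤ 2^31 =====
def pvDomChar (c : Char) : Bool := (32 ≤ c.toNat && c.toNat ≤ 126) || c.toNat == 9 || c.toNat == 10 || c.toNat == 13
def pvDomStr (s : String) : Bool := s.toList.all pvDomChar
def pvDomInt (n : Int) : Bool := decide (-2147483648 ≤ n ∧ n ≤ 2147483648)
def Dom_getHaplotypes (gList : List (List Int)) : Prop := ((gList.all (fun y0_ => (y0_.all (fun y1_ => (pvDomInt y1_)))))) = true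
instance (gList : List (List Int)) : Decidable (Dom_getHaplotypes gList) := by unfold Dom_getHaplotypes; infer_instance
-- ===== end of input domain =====

-- B replaces A's list-doubling product and O(|hList|) list-membership dedup by a bitmask
-- enumeration of the ambiguous positions with a set for dedup (objective: alternative).
-- Both A and B sort gList in place; the equivalence proved here is about the return value
-- (the in-place sort is identical in both).

-- ===== PORT A =====
-- 'list(l for l,_ in itertools.groupby(gList))': first element of each run of equal
-- consecutive elements (hand port, exact for groupby with no key function).
def pvGroupFirstsAux (p : List Int) : List (List Int) → List (List Int)
  | [] => []
  | x :: xs => if x = p then pvGroupFirstsAux p xs else x :: pvGroupFirstsAux x xs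

def pvGroupFirsts : List (List Int) → List (List Int)
  | [] => []
  | x :: xs => x :: pvGroupFirstsAux x xs

def getHaplotypes (gList : List (List Int)) : List (List Int) :=
  let sList := PySem.List.sorted gList (fun l => l) false
  let uList := pvGroupFirsts sList
  uList.foldl (fun hList u =>
    if ¬ (2 ∈ u) ∧ ¬ (u ∈ hList) then
      hList ++ [u]
    else
      let temp : List (List Int) := u.foldl (fun temp pos =>
        if pos = 2 then
          if temp.length = 0 then [[0], [1]]
          else (temp.map (fun l => l ++ [0])) ++ (temp.map (fun l => l ++ [1]))
        else
          if temp.length = 0 then [[pos]]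
          else temp.map (fun l => l ++ [pos])) []
      temp.foldl (fun hList t => if t ∈ hList then hList else hList ++ [t]) hList) []

-- ===== PORT B =====
def getHaplotypes_alt (gList : List (List Int)) : List (List Int) :=
  let sList := PySem.List.sorted gList (fun l => l) false
  let st := sList.foldl
    (fun (st : Option (List Int) × PySem.Set (List Int) × List (List Int)) u =>
      if some u = st.1 then st
      else
        let inner := (PySem.List.pyRange 0 ((2 : Int) ^ (u.count 2)) 1).foldl
          (fun (sh : PySem.Set (List Int) × List (List Int)) mask =>
            let hm := u.foldl (fun (hm : List Int × Int) v =>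
              if v = 2 then (hm.1 ++ [PySem.Int.mod hm.2 2], PySem.Int.floordiv hm.2 2)
              else (hm.1 ++ [v], hm.2)) ([], mask)
            if PySem.Set.contains sh.1 hm.1 then sh
            else (PySem.Set.add sh.1 hm.1, sh.2 ++ [hm.1]))
          (st.2.1, st.2.2)
        (some u, inner.1, inner.2))
    (none, PySem.Set.empty, [])
  st.2.2

-- ===== PRECONDITION & SPEC =====
def Spec_getHaplotypes (gList : List (List Int)) (out : List (List Int)) : Prop := out = getHaplotypes_alt gList
instance (gList : List (List Int)) (out : List (List Int)) : Decidable (Spec_getHaplotypes gList out) := by unfold Spec_getHaplotypes; infer_instance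

-- ===== CLAIM (what is proved, stated in full; the proofs are below) =====
def Claim_equal_getHaplotypes : Prop := ∀ (gList : List (List Int)), Dom_getHaplotypes gList → Spec_getHaplotypes gList (getHaplotypes gList)

-- ===== LEMMAS AND PROOFS =====
def pvE : List Int → List (List Int)
  | [] => [[]]
  | v :: u => if v = 2 then (pvE u).flatMap (fun h => [0 :: h, 1 :: h]) else (pvE u).map (v :: ·)

theorem pvE_no2 (u : List Int) (h : ¬ (2 ∈ u)) : pvE u = [u] := by
  induction u with
  | nil => rfl
  | cons v u ih =>
    simp only [List.mem_cons, not_or] at h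
    simp [pvE, Ne.symm h.1, ih h.2]

theorem foldlA_inv (u : List Int) (T : List (List Int)) (hT : T ≠ []) :
    u.foldl (fun temp pos =>
        if pos = 2 then
          if temp.length = 0 then [[0], [1]]
          else (temp.map (fun l => l ++ [0])) ++ (temp.map (fun l => l ++ [1]))
        else
          if temp.length = 0 then [[pos]]
          else temp.map (fun l => l ++ [pos])) T
      = (pvE u).flatMap (fun h => T.map (fun t => t ++ h)) := by
  induction u generalizing T with
  | nil => simp [pvE]
  | cons v u ih =>
    simp only [List.foldl_cons]
    by_cases hv : v = 2
    · subst hv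
      rw [if_pos rfl, if_neg (by simpa using hT), ih _ (by simp [hT])]
      simp only [pvE, if_true]
      rw [List.flatMap_assoc]
      congr 1; funext h
      simp [List.flatMap_cons, List.flatMap_nil, List.map_map, Function.comp_def]
    · rw [if_neg hv, if_neg (by simpa using hT), ih _ (by simp [hT])]
      simp only [pvE, hv, if_false, List.flatMap_map]
      congr 1; funext h
      simp [List.map_map, Function.comp_def]

theorem foldlA_nil_start (u : List Int) (hu : u ≠ []) :
    u.foldl (fun temp pos =>
        if pos = 2 then
          if temp.length = 0 then [[0], [1]]
          else (temp.map (fun l => l ++ [0])) ++ (temp.map (fun l => l ++ [1]))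
        else
          if temp.length = 0 then [[pos]]
          else temp.map (fun l => l ++ [pos])) []
      = pvE u := by
  cases u with
  | nil => exact absurd rfl hu
  | cons v u =>
    simp only [List.foldl_cons, List.length_nil]
    by_cases hv : v = 2
    · subst hv
      rw [if_pos rfl]
      simp only [if_true]
      rw [foldlA_inv u _ (by simp)]
      simp [pvE]
    · rw [if_neg hv]
      simp only [if_true]
      rw [foldlA_inv u _ (by simp)]
      simp [pvE, hv]
      exact Eq.symm List.map_eq_flatMap

def pvAssign : List Int → Int → List Int
  | [], _ => []
  | v :: u, m =>
    if v = 2 then PySem.Int.mod m 2 :: pvAssign u (PySem.Int.floordiv m 2)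
    else v :: pvAssign u m

theorem foldB_assign (u : List Int) (h0 : List Int) (m0 : Int) :
    (u.foldl (fun (hm : List Int × Int) v =>
        if v = 2 then (hm.1 ++ [PySem.Int.mod hm.2 2], PySem.Int.floordiv hm.2 2)
        else (hm.1 ++ [v], hm.2)) (h0, m0)).1 = h0 ++ pvAssign u m0 := by
  induction u generalizing h0 m0 with
  | nil => simp [pvAssign]
  | cons v u ih =>
    simp only [List.foldl_cons, pvAssign]
    by_cases hv : v = 2
    · simp only [hv, if_true, ih]
      simp
    · simp only [hv, if_false, ih]
      simp

def pvDedupApp (hList : List (List Int)) (l : List (List Int)) : List (List Int) :=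
  l.foldl (fun acc t => if t ∈ acc then acc else acc ++ [t]) hList

def pvStepA (hList : List (List Int)) (u : List Int) : List (List Int) :=
  if ¬ (2 ∈ u) ∧ ¬ (u ∈ hList) then
    hList ++ [u]
  else
    let temp : List (List Int) := u.foldl (fun temp pos =>
      if pos = 2 then
        if temp.length = 0 then [[0], [1]]
        else (temp.map (fun l => l ++ [0])) ++ (temp.map (fun l => l ++ [1]))
      else
        if temp.length = 0 then [[pos]]
        else temp.map (fun l => l ++ [pos])) []
    temp.foldl (fun hList t => if t ∈ hList then hList else hList ++ [t]) hList

theorem stepA_eq (u : List Int) (hList : List (List Int)) :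
    pvStepA hList u = pvDedupApp hList (pvE u) := by
  rcases eq_or_ne u [] with rfl | hu
  · simp only [pvStepA, pvDedupApp, pvE]
    by_cases h : ([] : List Int) ∈ hList
    · simp [h]
    · simp [h]
  · simp only [pvStepA, pvDedupApp]
    rw [foldlA_nil_start u hu]
    by_cases hc : ¬ (2 ∈ u) ∧ ¬ (u ∈ hList)
    · rw [if_pos hc, pvE_no2 u hc.1]
      simp [hc.2]
    · rw [if_neg hc]

theorem range_double (n : Nat) :
    PySem.List.pyRange 0 (2 * (n : Int)) 1
      = (PySem.List.pyRange 0 (n : Int) 1).flatMap (fun q => [2 * q, 2 * q + 1]) := by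
  induction n with
  | zero => simp [PySem.List.pyRange_one_eq_nil]
  | succ n ih =>
    rw [show ((n + 1 : Nat) : Int) = (n : Int) + 1 by push_cast; ring]
    rw [PySem.List.pyRange_one_succ_right (by positivity)]
    rw [show (2 : Int) * ((n : Int) + 1) = (2 * (n : Int) + 1) + 1 by ring]
    rw [PySem.List.pyRange_one_succ_right (by positivity)]
    rw [show (2 * (n : Int) + 1) = (2 * (n : Int)) + 1 by ring]
    rw [PySem.List.pyRange_one_succ_right (by positivity)]
    rw [ih, List.flatMap_append]
    simp

theorem assign_range (u : List Int) :
    (PySem.List.pyRange 0 ((2 : Int) ^ (u.count 2)) 1).map (pvAssign u) = pvE u := by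
  induction u with
  | nil =>
    decide
  | cons v u ih =>
    by_cases hv : v = 2
    · subst hv
      rw [List.count_cons_self]
      rw [show (2:Int) ^ (u.count 2 + 1) = 2 * (2:Int) ^ (u.count 2) by ring]
      rw [show ((2:Int) ^ (u.count 2)) = ((2 ^ (u.count 2) : Nat) : Int) by push_cast; ring]
      rw [range_double, List.map_flatMap]
      rw [show ((2 ^ (u.count 2) : Nat) : Int) = ((2:Int) ^ (u.count 2)) by push_cast; ring]
      simp only [pvE, if_true]
      rw [← ih, List.flatMap_map]
      congr 1; funext q
      have hm0 : PySem.Int.mod (2 * q) 2 = 0 := by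
        rw [PySem.Int.mod_eq_emod_of_pos (by norm_num : (0:Int) < 2)]; omega
      have hm1 : PySem.Int.mod (2 * q + 1) 2 = 1 := by
        rw [PySem.Int.mod_eq_emod_of_pos (by norm_num : (0:Int) < 2)]; omega
      have hd0 : PySem.Int.floordiv (2 * q) 2 = q := by
        rw [PySem.Int.floordiv_eq_ediv_of_pos (by norm_num : (0:Int) < 2)]; omega
      have hd1 : PySem.Int.floordiv (2 * q + 1) 2 = q := by
        rw [PySem.Int.floordiv_eq_ediv_of_pos (by norm_num : (0:Int) < 2)]; omega
      have e0 : pvAssign (2 :: u) (2 * q) = 0 :: pvAssign u q := by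
        simp only [pvAssign, hm0, hd0, if_true]
      have e1 : pvAssign (2 :: u) (2 * q + 1) = 1 :: pvAssign u q := by
        simp only [pvAssign, hm1, hd1, if_true]
      simp [e0, e1]
    · rw [List.count_cons_of_ne (by exact hv) ]
      simp only [pvE, hv, if_false]
      rw [← ih, List.map_map]
      congr 1; funext m
      simp [pvAssign, hv]

def pvDStep (sh : PySem.Set (List Int) × List (List Int)) (t : List Int) :
    PySem.Set (List Int) × List (List Int) :=
  if PySem.Set.contains sh.1 t then sh else (PySem.Set.add sh.1 t, sh.2 ++ [t])

theorem dedup_fold_inv (l : List (List Int)) (seen : PySem.Set (List Int)) (hList : List (List Int))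
    (hinv : ∀ x, x ∈ seen ↔ x ∈ hList) :
    (l.foldl pvDStep (seen, hList)).2 = pvDedupApp hList l
    ∧ ∀ x, x ∈ (l.foldl pvDStep (seen, hList)).1 ↔ x ∈ (l.foldl pvDStep (seen, hList)).2 := by
  induction l generalizing seen hList with
  | nil => exact ⟨rfl, hinv⟩
  | cons t l ih =>
    simp only [List.foldl_cons, pvDedupApp, pvDStep]
    by_cases ht : t ∈ hList
    · have hc : PySem.Set.contains seen t = true := (PySem.Set.contains_iff _ _).mpr ((hinv t).mpr ht)
      rw [hc]
      simp only [if_true, if_pos ht]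
      exact ih seen hList hinv
    · have hc : ¬ PySem.Set.contains seen t = true := by
        intro h; exact ht ((hinv t).mp ((PySem.Set.contains_iff _ _).mp h))
      simp only [hc, if_neg ht]
      refine ih _ _ ?_
      intro x
      rw [PySem.Set.mem_add]
      simp [hinv x]

def pvStepB (st : Option (List Int) × PySem.Set (List Int) × List (List Int)) (u : List Int) :
    Option (List Int) × PySem.Set (List Int) × List (List Int) :=
  if some u = st.1 then st
  else
    let inner := (PySem.List.pyRange 0 ((2 : Int) ^ (u.count 2)) 1).foldl
      (fun (sh : PySem.Set (List Int) × List (List Int)) mask =>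
        let hm := u.foldl (fun (hm : List Int × Int) v =>
          if v = 2 then (hm.1 ++ [PySem.Int.mod hm.2 2], PySem.Int.floordiv hm.2 2)
          else (hm.1 ++ [v], hm.2)) ([], mask)
        if PySem.Set.contains sh.1 hm.1 then sh
        else (PySem.Set.add sh.1 hm.1, sh.2 ++ [hm.1]))
      (st.2.1, st.2.2)
    (some u, inner.1, inner.2)

theorem inner_eq (u : List Int) (seen : PySem.Set (List Int)) (hList : List (List Int)) :
    (PySem.List.pyRange 0 ((2 : Int) ^ (u.count 2)) 1).foldl
      (fun (sh : PySem.Set (List Int) × List (List Int)) mask =>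
        let hm := u.foldl (fun (hm : List Int × Int) v =>
          if v = 2 then (hm.1 ++ [PySem.Int.mod hm.2 2], PySem.Int.floordiv hm.2 2)
          else (hm.1 ++ [v], hm.2)) ([], mask)
        if PySem.Set.contains sh.1 hm.1 then sh
        else (PySem.Set.add sh.1 hm.1, sh.2 ++ [hm.1]))
      (seen, hList)
    = (pvE u).foldl pvDStep (seen, hList) := by
  have hbody : (fun (sh : PySem.Set (List Int) × List (List Int)) mask =>
        let hm := u.foldl (fun (hm : List Int × Int) v =>
          if v = 2 then (hm.1 ++ [PySem.Int.mod hm.2 2], PySem.Int.floordiv hm.2 2)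
          else (hm.1 ++ [v], hm.2)) ([], mask)
        if PySem.Set.contains sh.1 hm.1 then sh
        else (PySem.Set.add sh.1 hm.1, sh.2 ++ [hm.1]))
      = fun sh mask => pvDStep sh (pvAssign u mask) := by
    funext sh mask
    have h := foldB_assign u [] mask
    simp only [List.nil_append] at h
    simp only [pvDStep, h]
  rw [hbody, ← List.foldl_map, assign_range]

theorem main_aux (xs : List (List Int)) (p : List Int) (seen : PySem.Set (List Int))
    (hList : List (List Int)) (hinv : ∀ x, x ∈ seen ↔ x ∈ hList) :
    (xs.foldl pvStepB (some p, seen, hList)).2.2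
      = (pvGroupFirstsAux p xs).foldl pvStepA hList := by
  induction xs generalizing p seen hList with
  | nil => rfl
  | cons x xs ih =>
    simp only [List.foldl_cons, pvGroupFirstsAux]
    by_cases hx : x = p
    · rw [if_pos hx, pvStepB, if_pos (by simp [hx])]
      exact ih p seen hList hinv
    · rw [if_neg hx]
      have hne : ¬ (some x = some p) := by simp [hx]
      simp only [List.foldl_cons]
      rw [show pvStepB (some p, seen, hList) x
            = (some x, ((pvE x).foldl pvDStep (seen, hList)).1, ((pvE x).foldl pvDStep (seen, hList)).2) by
        simp only [pvStepB, if_neg hne]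
        rw [inner_eq]]
      obtain ⟨h2, hinv'⟩ := dedup_fold_inv (pvE x) seen hList hinv
      rw [ih x _ _ hinv']
      rw [h2, stepA_eq]

theorem main_eq (xs : List (List Int)) :
    (xs.foldl pvStepB ((none : Option (List Int)), (PySem.Set.empty : PySem.Set (List Int)), ([] : List (List Int)))).2.2
      = (pvGroupFirsts xs).foldl pvStepA [] := by
  cases xs with
  | nil => rfl
  | cons x xs =>
    simp only [List.foldl_cons, pvGroupFirsts]
    rw [show pvStepB (none, PySem.Set.empty, []) x
          = (some x, ((pvE x).foldl pvDStep (PySem.Set.empty, [])).1, ((pvE x).foldl pvDStep (PySem.Set.empty, [])).2) by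
      simp only [pvStepB, if_neg (by simp : ¬ (some x = (none : Option (List Int))))]
      rw [inner_eq]]
    obtain ⟨h2, hinv'⟩ := dedup_fold_inv (pvE x) PySem.Set.empty [] (by simp [PySem.Set.empty])
    rw [main_aux xs x _ _ hinv', h2, stepA_eq]

-- ===== VERDICT (by name: the statement is the Claim_ definition above) =====
theorem getHaplotypes_spec : Claim_equal_getHaplotypes := by
  intro gList _
  show getHaplotypes gList = getHaplotypes_alt gList
  show (pvGroupFirsts (PySem.List.sorted gList (fun l => l) false)).foldl pvStepA []
      = ((PySem.List.sorted gList (fun l => l) false).foldl pvStepB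
          ((none : Option (List Int)), (PySem.Set.empty : PySem.Set (List Int)), ([] : List (List Int)))).2.2
  exact (main_eq _).symm
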